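-- pv_equiv track=rewrite | github.com/bioShaun/TiebaScrawler | test/extract.py | nearest_enclose
-- ===== SOURCE A (Python) =====
-- def nearest_enclose(a, b, limit=20):
--     new_border = b.copy()
--     for n, each in enumerate(a):
--         if n < len(a) - 1:
--             if each < b[0] and a[n + 1] > b[0]:
--                 if b[0] - each < limit:
--                     new_border[0] = each
--             elif each < b[1] and a[n + 1] > b[1]:
--                 if a[n + 1] - b[1] < limit:
--                     new_border[1] = a[n + 1]
--     return new_border
-- ===== SOURCE B (Python) =====
-- def nearest_enclose(a, b, limit=20):
--     res = b.copy()
--     need0 = need1 = True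
--     for i in range(len(a) - 2, -1, -1):
--         lo, hi = a[i], a[i + 1]
--         if lo < b[0] < hi:
--             if need0 and b[0] - lo < limit:
--                 res[0] = lo
--                 need0 = False
--         elif need1 and lo < b[1] < hi and hi - b[1] < limit:
--             res[1] = hi
--             need1 = False
--         if not (need0 or need1):
--             break
--     return res
-- ===== Notes on version B (the rewrite author's own statement) =====
-- stated objective: alternative
-- what changed: B scans the adjacent pairs backwards, takes the FIRST match for each border and breaks out early once both borders are settled, instead of A's forward full pass with last-write-wins overwrites; Pre_ excludes b shorter than 2 elements while len(a) >= 2, where both programs normally raise IndexError.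
-- outside the precondition, e.g. on nearest_enclose([0, 2], [1], 20): A returns [0], B returns [0]
import Mathlib
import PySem

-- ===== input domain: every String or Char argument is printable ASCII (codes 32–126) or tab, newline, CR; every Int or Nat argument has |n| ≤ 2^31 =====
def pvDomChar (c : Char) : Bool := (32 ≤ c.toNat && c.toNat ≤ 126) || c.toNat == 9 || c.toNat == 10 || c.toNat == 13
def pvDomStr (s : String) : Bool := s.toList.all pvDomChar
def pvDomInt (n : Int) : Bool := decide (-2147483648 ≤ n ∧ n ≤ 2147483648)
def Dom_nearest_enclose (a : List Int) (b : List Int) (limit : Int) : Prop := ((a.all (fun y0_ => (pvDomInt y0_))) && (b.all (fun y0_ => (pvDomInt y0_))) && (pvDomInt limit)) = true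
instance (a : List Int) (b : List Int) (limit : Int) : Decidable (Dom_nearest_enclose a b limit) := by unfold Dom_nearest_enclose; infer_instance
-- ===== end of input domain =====

-- B scans the adjacent pairs from the END and takes the FIRST match for each border,
-- stopping early once both are settled (objective: alternative traversal, same result).

-- ===== PORT A =====
-- loop body of A: for (n, each) in enumerate(a), updating new_border
def pvStepA (a : List Int) (b : List Int) (limit : Int)
    (nb : List Int) (p : Int × Int) : List Int :=
  if p.1 < (a.length : Int) - 1 then
    match PySem.List.pyGet? a (p.1 + 1), PySem.List.pyGet? b 0, PySem.List.pyGet? b 1 with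
    | some an1, some b0, some b1 =>
      if p.2 < b0 ∧ an1 > b0 then
        if b0 - p.2 < limit then nb.set 0 p.2 else nb
      else if p.2 < b1 ∧ an1 > b1 then
        if an1 - b1 < limit then nb.set 1 an1 else nb
      else nb
    | _, _, _ => nb          -- b[0] / b[1] missing: Python raises; outside Pre_
  else nb

def nearest_enclose (a : List Int) (b : List Int) (limit : Int) : List Int :=
  (PySem.List.enumerate a 0).foldl (pvStepA a b limit) b

-- ===== PORT B =====
-- Source B's backward loop over adjacent pairs, with the need-flags and the early break
def pvLoopB (b0 b1 limit : Int) :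
    List (Int × Int) → List Int → Bool → Bool → List Int
  | [], res, _, _ => res
  | p :: rest, res, need0, need1 =>
    let st := if decide (p.1 < b0 ∧ b0 < p.2) then
        (if need0 && decide (b0 - p.1 < limit) then (res.set 0 p.1, false, need1)
         else (res, need0, need1))
      else
        (if need1 && decide (p.1 < b1 ∧ b1 < p.2 ∧ p.2 - b1 < limit) then (res.set 1 p.2, need0, false)
         else (res, need0, need1))
    if !st.2.1 && !st.2.2 then st.1 else pvLoopB b0 b1 limit rest st.1 st.2.1 st.2.2

def nearest_enclose_alt (a : List Int) (b : List Int) (limit : Int) : List Int :=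
  match PySem.List.pyGet? b 0, PySem.List.pyGet? b 1 with
  | some b0, some b1 => pvLoopB b0 b1 limit ((a.zip (a.drop 1)).reverse) b true true
  | _, _ => b              -- with a.length ≤ 1 the Python loop body never runs; b.length < 2 otherwise raises (outside Pre_)

-- ===== PRECONDITION & SPEC =====
-- Pre_ excludes b with fewer than two elements while a has at least two: there both
-- programs normally raise IndexError; in the accidental corner where every adjacent pair
-- of a straddles b[0], both still return the same value, so Pre_ is only slightly
-- narrower than the raise set (the ports cannot model the lazy b[1] access there).
def Pre_nearest_enclose (a : List Int) (b : List Int) (_limit : Int) : Prop :=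
  2 ≤ b.length ∨ a.length ≤ 1
instance (a : List Int) (b : List Int) (limit : Int) : Decidable (Pre_nearest_enclose a b limit) := by
  unfold Pre_nearest_enclose; infer_instance

def pvWitness_nearest_enclose : List Int × List Int × Int := ([1, 5, 9], [4, 6], 20)

def Spec_nearest_enclose (a : List Int) (b : List Int) (limit : Int) (out : List Int) : Prop := out = nearest_enclose_alt a b limit
instance (a : List Int) (b : List Int) (limit : Int) (out : List Int) : Decidable (Spec_nearest_enclose a b limit out) := by unfold Spec_nearest_enclose; infer_instance

-- ===== CLAIM (what is proved, stated in full; the proofs are below) =====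
def Claim_equal_nearest_enclose : Prop := ∀ (a : List Int) (b : List Int) (limit : Int), Dom_nearest_enclose a b limit → Pre_nearest_enclose a b limit → Spec_nearest_enclose a b limit (nearest_enclose a b limit)

-- ===== LEMMAS AND PROOFS =====

-- the pair-level step that A's enumerate loop reduces to
def pvStepP (b0 b1 limit : Int) (nb : List Int) (p : Int × Int) : List Int :=
  if p.1 < b0 ∧ b0 < p.2 then
    (if b0 - p.1 < limit then nb.set 0 p.1 else nb)
  else if p.1 < b1 ∧ b1 < p.2 then
    (if p.2 - b1 < limit then nb.set 1 p.2 else nb)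
  else nb

-- A's enumerate-fold over a suffix of a equals the pair fold over that suffix
theorem pvA_fold_eq_pairs (a b : List Int) (limit b0 b1 : Int)
    (hb0 : PySem.List.pyGet? b 0 = some b0) (hb1 : PySem.List.pyGet? b 1 = some b1) :
    ∀ (t : List Int) (k : Nat), t = a.drop k →
      ∀ nb, (PySem.List.enumerate t (k : Int)).foldl (pvStepA a b limit) nb
            = (t.zip t.tail).foldl (pvStepP b0 b1 limit) nb := by
  intro t
  induction t with
  | nil => intro k _ nb; simp [PySem.List.enumerate_nil]
  | cons e t' ih =>
    intro k hk nb
    have hkl : k < a.length := by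
      by_contra h
      have h2 : a.drop k = [] := List.drop_eq_nil_of_le (by omega)
      rw [h2] at hk; exact List.cons_ne_nil _ _ hk
    have hlen : t'.length + k + 1 = a.length := by
      have h3 := congrArg List.length hk
      simp [List.length_drop] at h3
      omega
    have hdrop' : t' = a.drop (k + 1) := by
      have h6 : a.drop (k+1) = (a.drop k).drop 1 := by
        rw [List.drop_drop]
      rw [h6, ← hk]
      rfl
    cases t' with
    | nil =>
      have hguard : ¬ ((k : Int) < (a.length : Int) - 1) := by
        simp at hlen; omega
      simp [PySem.List.enumerate_cons, PySem.List.enumerate_nil, pvStepA, hguard]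
    | cons f t'' =>
      have hguard : ((k : Int) < (a.length : Int) - 1) := by
        simp at hlen; omega
      have hget : PySem.List.pyGet? a ((k : Int) + 1) = some f := by
        have h1 : ((k : Int) + 1) = ((k + 1 : Nat) : Int) := by push_cast; ring
        have h4 : a[k+1]? = some f := by
          have h5 : (a.drop (k+1))[0]? = a[k+1+0]? := List.getElem?_drop ..
          rw [← hdrop'] at h5
          simpa using h5.symm
        rw [h1, PySem.List.pyGet?_natCast, h4]
      have hstep : pvStepA a b limit nb ((k : Int), e) = pvStepP b0 b1 limit nb (e, f) := by
        simp only [pvStepA, pvStepP, hguard, if_true, hget, hb0, hb1]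
      have hk1 : ((k : Int) + 1) = ((k + 1 : Nat) : Int) := by push_cast; ring
      calc (PySem.List.enumerate (e :: f :: t'') (k : Int)).foldl (pvStepA a b limit) nb
          = (PySem.List.enumerate (f :: t'') ((k : Int) + 1)).foldl (pvStepA a b limit)
              (pvStepA a b limit nb ((k : Int), e)) := by
            rw [PySem.List.enumerate_cons]; rfl
        _ = ((f :: t'').zip (f :: t'').tail).foldl (pvStepP b0 b1 limit)
              (pvStepP b0 b1 limit nb (e, f)) := by
            rw [hstep, hk1, ih (k+1) hdrop']
        _ = ((e :: f :: t'').zip (e :: f :: t'').tail).foldl (pvStepP b0 b1 limit) nb := by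
            rfl

-- commuting writes at indices 0 and 1
theorem pvSet10 (l : List Int) (x v : Int) : (l.set 1 v).set 0 x = (l.set 0 x).set 1 v :=
  List.set_comm v x (by omega)

-- pair fold closed form: last matching candidate for each border (A's semantics)
theorem pvPairs_fold_closed (b0 b1 limit : Int) :
    ∀ (ps : List (Int × Int)) (nb : List Int),
      ps.foldl (pvStepP b0 b1 limit) nb
      = (match (ps.filterMap (fun (p : Int × Int) => if ¬ (p.1 < b0 ∧ b0 < p.2) ∧ p.1 < b1 ∧ b1 < p.2 ∧ p.2 - b1 < limit then some p.2 else none)).getLast? with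
         | some v =>
           (match (ps.filterMap (fun (p : Int × Int) => if p.1 < b0 ∧ b0 < p.2 ∧ b0 - p.1 < limit then some p.1 else none)).getLast? with
            | some u => nb.set 0 u | none => nb).set 1 v
         | none =>
           match (ps.filterMap (fun (p : Int × Int) => if p.1 < b0 ∧ b0 < p.2 ∧ b0 - p.1 < limit then some p.1 else none)).getLast? with
           | some u => nb.set 0 u | none => nb) := by
  intro ps
  induction ps using List.reverseRecOn with
  | nil => intro nb; simp
  | append_singleton ps p ih =>
    intro nb
    obtain ⟨x, y⟩ := p
    simp only [List.foldl_append, List.foldl_cons, List.foldl_nil, ih, List.filterMap_append]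
    by_cases hs0 : x < b0 ∧ b0 < y
    · have e1 : List.filterMap (fun (p : Int × Int) => if ¬ (p.1 < b0 ∧ b0 < p.2) ∧ p.1 < b1 ∧ b1 < p.2 ∧ p.2 - b1 < limit then some p.2 else none) [(x, y)] = [] := by
        have hcf : ¬ (¬ (x < b0 ∧ b0 < y) ∧ x < b1 ∧ b1 < y ∧ y - b1 < limit) := fun hc => hc.1 hs0
        simp only [List.filterMap_cons, List.filterMap_nil, if_neg hcf]
      by_cases hl0 : b0 - x < limit
      · have e0 : List.filterMap (fun (p : Int × Int) => if p.1 < b0 ∧ b0 < p.2 ∧ b0 - p.1 < limit then some p.1 else none) [(x, y)] = [x] := by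
          simp [hs0.1, hs0.2, hl0]
        simp only [e0, e1, pvStepP, hs0, and_self, if_true, hl0, List.append_nil, List.getLast?_concat]
        generalize (List.filterMap (fun (p : Int × Int) => if ¬ (p.1 < b0 ∧ b0 < p.2) ∧ p.1 < b1 ∧ b1 < p.2 ∧ p.2 - b1 < limit then some p.2 else none) ps).getLast? = o1
        generalize (List.filterMap (fun (p : Int × Int) => if p.1 < b0 ∧ b0 < p.2 ∧ b0 - p.1 < limit then some p.1 else none) ps).getLast? = o0
        cases o0 <;> cases o1 <;> simp [pvSet10]
      · have e0 : List.filterMap (fun (p : Int × Int) => if p.1 < b0 ∧ b0 < p.2 ∧ b0 - p.1 < limit then some p.1 else none) [(x, y)] = [] := by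
          have hcf : ¬ (x < b0 ∧ b0 < y ∧ b0 - x < limit) := fun hc => hl0 hc.2.2
          simp only [List.filterMap_cons, List.filterMap_nil, if_neg hcf]
        simp only [e0, e1, pvStepP, hs0, and_self, if_true, hl0, if_false, List.append_nil]
    · by_cases hs1 : (x < b1 ∧ b1 < y) ∧ y - b1 < limit
      · have e0 : List.filterMap (fun (p : Int × Int) => if p.1 < b0 ∧ b0 < p.2 ∧ b0 - p.1 < limit then some p.1 else none) [(x, y)] = [] := by
          have hcf : ¬ (x < b0 ∧ b0 < y ∧ b0 - x < limit) := fun hc => hs0 ⟨hc.1, hc.2.1⟩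
          simp only [List.filterMap_cons, List.filterMap_nil, if_neg hcf]
        have e1 : List.filterMap (fun (p : Int × Int) => if ¬ (p.1 < b0 ∧ b0 < p.2) ∧ p.1 < b1 ∧ b1 < p.2 ∧ p.2 - b1 < limit then some p.2 else none) [(x, y)] = [y] := by
          have hct : ¬ (x < b0 ∧ b0 < y) ∧ x < b1 ∧ b1 < y ∧ y - b1 < limit :=
            ⟨hs0, hs1.1.1, hs1.1.2, hs1.2⟩
          simp only [List.filterMap_cons, List.filterMap_nil, if_pos hct]
        simp only [e0, e1, pvStepP, hs0, if_false, hs1.1, hs1.2, and_self, if_true,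
          List.append_nil, List.getLast?_concat]
        generalize (List.filterMap (fun (p : Int × Int) => if p.1 < b0 ∧ b0 < p.2 ∧ b0 - p.1 < limit then some p.1 else none) ps).getLast? = o0
        generalize (List.filterMap (fun (p : Int × Int) => if ¬ (p.1 < b0 ∧ b0 < p.2) ∧ p.1 < b1 ∧ b1 < p.2 ∧ p.2 - b1 < limit then some p.2 else none) ps).getLast? = o1
        cases o0 <;> cases o1 <;> simp [List.set_set]
      · have e0 : List.filterMap (fun (p : Int × Int) => if p.1 < b0 ∧ b0 < p.2 ∧ b0 - p.1 < limit then some p.1 else none) [(x, y)] = [] := by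
          have hcf : ¬ (x < b0 ∧ b0 < y ∧ b0 - x < limit) := fun hc => hs0 ⟨hc.1, hc.2.1⟩
          simp only [List.filterMap_cons, List.filterMap_nil, if_neg hcf]
        have e1 : List.filterMap (fun (p : Int × Int) => if ¬ (p.1 < b0 ∧ b0 < p.2) ∧ p.1 < b1 ∧ b1 < p.2 ∧ p.2 - b1 < limit then some p.2 else none) [(x, y)] = [] := by
          have hcf : ¬ (¬ (x < b0 ∧ b0 < y) ∧ x < b1 ∧ b1 < y ∧ y - b1 < limit) :=
            fun hc => hs1 ⟨⟨hc.2.1, hc.2.2.1⟩, hc.2.2.2⟩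
          simp only [List.filterMap_cons, List.filterMap_nil, if_neg hcf]
        have hstep : pvStepP b0 b1 limit (ps.foldl (pvStepP b0 b1 limit) nb) (x, y)
            = ps.foldl (pvStepP b0 b1 limit) nb := by
          simp only [pvStepP, hs0, if_false]
          by_cases hb1' : x < b1 ∧ b1 < y
          · have : ¬ (y - b1 < limit) := fun hc => hs1 ⟨hb1', hc⟩
            simp [hb1', this]
          · simp [hb1']
        rw [← ih nb] at *
        simp only [e0, e1, List.append_nil, hstep]
        exact ih nb

-- the two pair classifications B's loop writes on (border 0; border 1 shadowed by border 0)
def pvQ0 (b0 limit : Int) (p : Int × Int) : Bool :=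
  decide (p.1 < b0 ∧ b0 < p.2 ∧ b0 - p.1 < limit)
def pvQ1 (b0 b1 limit : Int) (p : Int × Int) : Bool :=
  decide (¬ (p.1 < b0 ∧ b0 < p.2) ∧ p.1 < b1 ∧ b1 < p.2 ∧ p.2 - b1 < limit)

-- B's backward loop computes: first pvQ0-match sets index 0, first pvQ1-match sets index 1
theorem pvLoopB_closed (b0 b1 limit : Int) :
    ∀ (qs : List (Int × Int)) (res : List Int) (n0 n1 : Bool),
      pvLoopB b0 b1 limit qs res n0 n1
      = (let r0 := if n0 then
            (match (qs.filter (pvQ0 b0 limit)).head? with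
             | some p => res.set 0 p.1 | none => res) else res;
         if n1 then
            (match (qs.filter (pvQ1 b0 b1 limit)).head? with
             | some p => r0.set 1 p.2 | none => r0) else r0) := by
  intro qs
  induction qs with
  | nil => intro res n0 n1; cases n0 <;> cases n1 <;> simp [pvLoopB]
  | cons p rest ih =>
    intro res n0 n1
    by_cases hs : p.1 < b0 ∧ b0 < p.2
    · by_cases hl : b0 - p.1 < limit
      · have hq0 : pvQ0 b0 limit p = true := by simp [pvQ0, hs.1, hs.2, hl]
        have hq1 : pvQ1 b0 b1 limit p = false := by simp [pvQ1, hs.1, hs.2]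
        cases n0 <;> cases n1 <;>
          simp only [pvLoopB, List.filter_cons, hq0, hq1, hs, hl, decide_true, decide_false,
            Bool.and_true, Bool.true_and, Bool.and_false, Bool.false_and, Bool.not_true,
            Bool.not_false, if_true, if_false, List.head?_cons, ih, ite_true, ite_false] <;>
          (cases hf0 : List.find? (pvQ0 b0 limit) rest <;>
           cases hf1 : List.find? (pvQ1 b0 b1 limit) rest <;>
           simp [hf0, hf1, pvSet10, List.set_set])
      · have hq0 : pvQ0 b0 limit p = false := by simp [pvQ0, hl]
        have hq1 : pvQ1 b0 b1 limit p = false := by simp [pvQ1, hs.1, hs.2]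
        cases n0 <;> cases n1 <;>
          simp only [pvLoopB, List.filter_cons, hq0, hq1, hs, hl, decide_true, decide_false,
            Bool.and_true, Bool.true_and, Bool.and_false, Bool.false_and, Bool.not_true,
            Bool.not_false, if_true, if_false, List.head?_cons, ih, ite_true, ite_false] <;>
          (cases hf0 : List.find? (pvQ0 b0 limit) rest <;>
           cases hf1 : List.find? (pvQ1 b0 b1 limit) rest <;>
           simp [hf0, hf1, pvSet10, List.set_set])
    · have hq0 : pvQ0 b0 limit p = false := by
        simp only [pvQ0, decide_eq_false_iff_not]
        exact fun hc => hs ⟨hc.1, hc.2.1⟩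
      by_cases hl : p.1 < b1 ∧ b1 < p.2 ∧ p.2 - b1 < limit
      · have hq1 : pvQ1 b0 b1 limit p = true := by simp [pvQ1, hs, hl.1, hl.2.1, hl.2.2]
        cases n0 <;> cases n1 <;>
          simp only [pvLoopB, List.filter_cons, hq0, hq1, hs, hl, decide_true, decide_false,
            Bool.and_true, Bool.true_and, Bool.and_false, Bool.false_and, Bool.not_true,
            Bool.not_false, if_true, if_false, List.head?_cons, ih, ite_true, ite_false] <;>
          (cases hf0 : List.find? (pvQ0 b0 limit) rest <;>
           cases hf1 : List.find? (pvQ1 b0 b1 limit) rest <;>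
           simp [hf0, hf1, pvSet10, List.set_set])
      · have hq1 : pvQ1 b0 b1 limit p = false := by
          simp only [pvQ1, decide_eq_false_iff_not]
          exact fun hc => hl hc.2
        cases n0 <;> cases n1 <;>
          simp only [pvLoopB, List.filter_cons, hq0, hq1, hs, hl, decide_true, decide_false,
            Bool.and_true, Bool.true_and, Bool.and_false, Bool.false_and, Bool.not_true,
            Bool.not_false, if_true, if_false, List.head?_cons, ih, ite_true, ite_false] <;>
          (cases hf0 : List.find? (pvQ0 b0 limit) rest <;>
           cases hf1 : List.find? (pvQ1 b0 b1 limit) rest <;>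
           simp [hf0, hf1, pvSet10, List.set_set])

-- filterMap with an if-condition is map after filter
theorem pvFMfilter {β : Type} (c : Int × Int → Prop) [DecidablePred c]
    (f : Int × Int → β) (l : List (Int × Int)) :
    l.filterMap (fun p => if c p then some (f p) else none)
      = (l.filter (fun p => decide (c p))).map f := by
  induction l with
  | nil => rfl
  | cons x t ih =>
    simp only [List.filterMap_cons, List.filter_cons]
    by_cases h : c x <;> simp [h, ih]

theorem pvShort (a b : List Int) (limit : Int) (ha : a.length ≤ 1) :
    (PySem.List.enumerate a 0).foldl (pvStepA a b limit) b = b := by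
  cases a with
  | nil => simp [PySem.List.enumerate_nil]
  | cons x t =>
    cases t with
    | nil =>
      simp [PySem.List.enumerate_cons, PySem.List.enumerate_nil, pvStepA]
    | cons z zs => simp at ha

theorem pvGet0 (b : List Int) : PySem.List.pyGet? b 0 = b[0]? := by
  simpa using PySem.List.pyGet?_natCast (xs := b) (n := 0)

theorem pvGet1 (b : List Int) : PySem.List.pyGet? b 1 = b[1]? := by
  simpa using PySem.List.pyGet?_natCast (xs := b) (n := 1)

-- ===== VERDICT (by name: the statement is the Claim_ definition above) =====
theorem nearest_enclose_spec : Claim_equal_nearest_enclose := by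
  intro a b limit _ hpre
  unfold Spec_nearest_enclose nearest_enclose nearest_enclose_alt
  rcases hb0 : PySem.List.pyGet? b 0 with _ | b0
  · have hlb : b.length = 0 := by
      rw [pvGet0] at hb0
      have := List.getElem?_eq_none_iff.mp hb0
      omega
    have ha : a.length ≤ 1 := by
      rcases hpre with h | h
      · omega
      · exact h
    simp only [pvShort a b limit ha]
  · rcases hb1 : PySem.List.pyGet? b 1 with _ | b1
    · have hlb : b.length ≤ 1 := by
        rw [pvGet1] at hb1
        have := List.getElem?_eq_none_iff.mp hb1
        omega
      have ha : a.length ≤ 1 := by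
        rcases hpre with h | h
        · omega
        · exact h
      simp only [pvShort a b limit ha]
    · -- main case: both closed forms coincide border by border
      have hmain := pvA_fold_eq_pairs a b limit b0 b1 hb0 hb1 a 0 (by simp) b
      simp only [Nat.cast_zero] at hmain
      rw [hmain, pvPairs_fold_closed]
      simp only [hb0, hb1]
      rw [pvLoopB_closed]
      simp only [List.filter_reverse, List.head?_reverse, if_true, List.drop_one]
      have e0 : (List.filterMap (fun (p : Int × Int) => if p.1 < b0 ∧ b0 < p.2 ∧ b0 - p.1 < limit then some p.1 else none) (a.zip a.tail)).getLast?
          = ((a.zip a.tail).filter (pvQ0 b0 limit)).getLast?.map (fun p => p.1) := by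
        rw [pvFMfilter (fun p => p.1 < b0 ∧ b0 < p.2 ∧ b0 - p.1 < limit) (fun p => p.1)]
        rw [List.getLast?_map]
        rfl
      have e1 : (List.filterMap (fun (p : Int × Int) => if ¬ (p.1 < b0 ∧ b0 < p.2) ∧ p.1 < b1 ∧ b1 < p.2 ∧ p.2 - b1 < limit then some p.2 else none) (a.zip a.tail)).getLast?
          = ((a.zip a.tail).filter (pvQ1 b0 b1 limit)).getLast?.map (fun p => p.2) := by
        rw [pvFMfilter (fun p => ¬ (p.1 < b0 ∧ b0 < p.2) ∧ p.1 < b1 ∧ b1 < p.2 ∧ p.2 - b1 < limit) (fun p => p.2)]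
        rw [List.getLast?_map]
        rfl
      rw [e1, e0]
      rcases ((a.zip a.tail).filter (pvQ1 b0 b1 limit)).getLast? with _ | p <;>
        rcases ((a.zip a.tail).filter (pvQ0 b0 limit)).getLast? with _ | u <;> simp
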